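-- pv_equiv track=rewrite | github.com/anuk909/SpecGen-Artifact | specgen.py | mutate_token_list_prior
-- ===== SOURCE A (Python) =====
-- def mutate_token_list_prior(token_list, current_index):
--     res_list = []
--     token_variant_list = []
--     if current_index >= len(token_list):
--         return [[""]]
--     if token_list[current_index] == "<=":
--         token_variant_list = ["<", "<=", "- 1 <="]
--     elif token_list[current_index] == ">=":
--         token_variant_list = [">", ">=", "+ 1 >="]
--     elif token_list[current_index] == "<":
--         token_variant_list = ["<", "<="]
--     elif token_list[current_index] == ">":
--         token_variant_list = [">", ">="]
--     else:
--         token_variant_list = [token_list[current_index]]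
--     for variant in token_variant_list:
--         for res in mutate_token_list_prior(token_list, current_index + 1):
--             tmp_list = [variant]
--             tmp_list.extend(res)
--             res_list.append(tmp_list)
--     return res_list
-- ===== SOURCE B (Python) =====
-- _VARIANTS = {
--     "<=": ["<", "<=", "- 1 <="],
--     ">=": [">", ">=", "+ 1 >="],
--     "<": ["<", "<="],
--     ">": [">", ">="],
-- }
--
-- def mutate_token_list_prior(token_list, current_index):
--     # Iterative bottom-up build: one pass over the indices from the end,
--     # reusing each suffix's result list instead of recomputing it per variant.
--     res = [[""]]
--     i = len(token_list) - 1
--     while i >= current_index: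
--         tok = token_list[i]
--         variants = _VARIANTS.get(tok, [tok])
--         res = [[v] + r for v in variants for r in res]
--         i -= 1
--     return res
-- ===== Notes on version B (the rewrite author's own statement) =====
-- stated objective: alternative
-- what changed: Replaces A's recursion that re-runs the suffix computation once per variant with a single iterative bottom-up pass that builds each suffix's result list once (variant table as a dict).
import Mathlib
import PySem

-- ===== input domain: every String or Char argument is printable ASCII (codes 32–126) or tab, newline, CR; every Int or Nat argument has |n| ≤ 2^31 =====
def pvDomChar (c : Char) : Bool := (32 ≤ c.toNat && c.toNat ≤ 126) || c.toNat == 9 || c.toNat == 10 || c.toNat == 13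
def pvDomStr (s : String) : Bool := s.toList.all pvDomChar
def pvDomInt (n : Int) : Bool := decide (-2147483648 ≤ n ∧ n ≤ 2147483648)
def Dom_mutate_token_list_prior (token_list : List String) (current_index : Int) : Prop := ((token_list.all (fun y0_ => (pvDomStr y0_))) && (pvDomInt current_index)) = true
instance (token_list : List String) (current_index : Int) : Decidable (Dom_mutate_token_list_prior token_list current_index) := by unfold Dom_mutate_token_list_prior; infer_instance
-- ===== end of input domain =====

-- B replaces A's per-variant recursive recomputation of the suffix by one iterative bottom-up
-- pass that builds each suffix's result list once (objective: alternative decomposition).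

-- ===== PORT A =====
-- literal transliteration of A's recursion; the `none` branch of pyGet? is Python's
-- IndexError, excluded by Pre_ below
def mutate_token_list_prior (token_list : List String) (current_index : Int) : List (List String) :=
  if _h : current_index ≥ (token_list.length : Int) then [[""]]
  else
    -- pyGetD: total form of token_list[current_index]; in range under Pre_ below
    let tok := PySem.List.pyGetD token_list current_index ""
    let token_variant_list :=
        if tok = "<=" then ["<", "<=", "- 1 <="]
        else if tok = ">=" then [">", ">=", "+ 1 >="]
        else if tok = "<" then ["<", "<="]
        else if tok = ">" then [">", ">="]
        else [tok]
    token_variant_list.foldl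
      (fun res_list variant =>
        res_list ++ (mutate_token_list_prior token_list (current_index + 1)).map
          (fun res => variant :: res)) []
termination_by ((token_list.length : Int) - current_index).toNat
decreasing_by omega

-- ===== PORT B =====
-- B-side constant table _VARIANTS (a Python dict)
def pvVariantsDict : PySem.Dict String (List String) :=
  ((((PySem.Dict.empty.insert "<=" ["<", "<=", "- 1 <="]).insert
      ">=" [">", ">=", "+ 1 >="]).insert
      "<" ["<", "<="]).insert
      ">" [">", ">="])

-- the while loop of B: descending index i, accumulated res; the `.getD ""` spot is
-- Python's IndexError (outside Pre_)
def pvAltLoop (token_list : List String) (current_index : Int) (i : Int)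
    (res : List (List String)) : List (List String) :=
  if _h : i ≥ current_index then
    let tok := PySem.List.pyGetD token_list i ""
    let variants := pvVariantsDict.getD tok [tok]
    pvAltLoop token_list current_index (i - 1)
      (variants.flatMap (fun v => res.map (fun r => v :: r)))
  else res
termination_by (i - current_index + 1).toNat
decreasing_by omega

def mutate_token_list_prior_alt (token_list : List String) (current_index : Int) : List (List String) :=
  pvAltLoop token_list current_index ((token_list.length : Int) - 1) [[""]]

-- ===== PRECONDITION & SPEC =====
-- Pre_ excludes exactly the inputs where Python A raises IndexError
-- (current_index below -len(token_list)); B raises there too.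
def Pre_mutate_token_list_prior (token_list : List String) (current_index : Int) : Prop :=
  -(token_list.length : Int) ≤ current_index
instance (token_list : List String) (current_index : Int) : Decidable (Pre_mutate_token_list_prior token_list current_index) := by unfold Pre_mutate_token_list_prior; infer_instance

def pvWitness_mutate_token_list_prior : List String × Int := (["a", "<=", "b"], 0)

def Spec_mutate_token_list_prior (token_list : List String) (current_index : Int) (out : List (List String)) : Prop := out = mutate_token_list_prior_alt token_list current_index
instance (token_list : List String) (current_index : Int) (out : List (List String)) : Decidable (Spec_mutate_token_list_prior token_list current_index out) := by unfold Spec_mutate_token_list_prior; infer_instance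

-- ===== CLAIM (what is proved, stated in full; the proofs are below) =====
def Claim_equal_mutate_token_list_prior : Prop := ∀ (token_list : List String) (current_index : Int), Dom_mutate_token_list_prior token_list current_index → Pre_mutate_token_list_prior token_list current_index → Spec_mutate_token_list_prior token_list current_index (mutate_token_list_prior token_list current_index)

-- ===== LEMMAS AND PROOFS =====

-- the per-index step both programs perform, in B's (flatMap) form
def pvStep (token_list : List String) (i : Int) (res : List (List String)) : List (List String) :=
  let tok := PySem.List.pyGetD token_list i ""
  let variants := pvVariantsDict.getD tok [tok]
  variants.flatMap (fun v => res.map (fun r => v :: r))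

lemma pvAltLoop_eq_step (token_list : List String) (ci i : Int) (res : List (List String))
    (h : ci ≤ i) :
    pvAltLoop token_list ci i res = pvStep token_list ci (pvAltLoop token_list (ci + 1) i res) := by
  induction hk : (i - ci).toNat generalizing i res with
  | zero =>
    have hie : ci = i := by omega
    subst hie
    rw [pvAltLoop, dif_pos (le_refl ci)]
    rw [pvAltLoop, dif_neg (by omega : ¬ ci - 1 ≥ ci)]
    conv_rhs => rw [pvAltLoop, dif_neg (by omega : ¬ ci ≥ ci + 1)]
    rfl
  | succ n ih =>
    rw [pvAltLoop, dif_pos (by omega : i ≥ ci)]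
    conv_rhs => rw [pvAltLoop, dif_pos (by omega : i ≥ ci + 1)]
    exact ih (i - 1) _ (by omega) (by omega)

-- A's variant if-chain equals B's dict lookup with default
lemma pvVariants_eq (tok : String) :
    (if tok = "<=" then ["<", "<=", "- 1 <="]
     else if tok = ">=" then [">", ">=", "+ 1 >="]
     else if tok = "<" then ["<", "<="]
     else if tok = ">" then [">", ">="]
     else [tok]) = pvVariantsDict.getD tok [tok] := by
  simp only [pvVariantsDict, PySem.Dict.getD_insert, PySem.Dict.getD_empty]
  split_ifs <;> simp_all

-- main agreement, by induction on how far current_index is below len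
lemma pv_main (token_list : List String) (current_index : Int)
    (hpre : -(token_list.length : Int) ≤ current_index) :
    mutate_token_list_prior token_list current_index =
      mutate_token_list_prior_alt token_list current_index := by
  unfold mutate_token_list_prior_alt
  induction hk : ((token_list.length : Int) - current_index).toNat generalizing current_index with
  | zero =>
    rw [mutate_token_list_prior, pvAltLoop]
    rw [dif_pos (by omega : current_index ≥ (token_list.length : Int)),
        dif_neg (by omega : ¬ (token_list.length : Int) - 1 ≥ current_index)]
  | succ n ih =>
    have hlt : current_index < (token_list.length : Int) := by omega
    rw [mutate_token_list_prior, dif_neg (by omega : ¬ current_index ≥ (token_list.length : Int))]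
    rw [pvAltLoop_eq_step token_list current_index _ _ (by omega)]
    simp only [PySem.List.foldl_append_eq_flatMap, List.nil_append]
    rw [ih (current_index + 1) (by omega) (by omega)]
    simp only [pvStep, pvVariants_eq]

-- ===== VERDICT (by name: the statement is the Claim_ definition above) =====
theorem mutate_token_list_prior_spec : Claim_equal_mutate_token_list_prior := by
  intro token_list current_index _ hpre
  exact pv_main token_list current_index hpre
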